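-- pv_equiv track=rewrite | github.com/vladis62/only-algo |  yandex/sprint_1/hand_agility.py | hand_agility
-- ===== SOURCE A (Python) =====
-- def hand_agility(matrix, n):
--     max_touch = n * 2
--     numbers_to_count = {}
--     for i in range(0, 4):
--         for j in range(0, 4):
--             num = matrix[i][j]
--             if matrix[i][j] != '.':
--                 numbers_to_count[num] = numbers_to_count.get(num, 0) + 1
--     points = 0
--     for _, count in numbers_to_count.items():
--         if count <= max_touch:
--             points = points + 1
--     return points
-- ===== SOURCE B (Python) =====
-- def hand_agility(matrix, n):
--     vals = sorted(matrix[i][j] for i in range(4) for j in range(4) if matrix[i][j] != '.')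
--     points = 0
--     k = 0
--     while k < len(vals):
--         j = k
--         while j < len(vals) and vals[j] == vals[k]:
--             j += 1
--         if j - k <= 2 * n:
--             points += 1
--         k = j
--     return points
-- ===== Notes on version B (the rewrite author's own statement) =====
-- stated objective: alternative
-- what changed: Replaces the hash-dictionary counting pass (build a counter dict over the 16 indexed cells, then iterate its items) by flatten-filter-sort followed by a single run-length scan of the sorted values.
import Mathlib
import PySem

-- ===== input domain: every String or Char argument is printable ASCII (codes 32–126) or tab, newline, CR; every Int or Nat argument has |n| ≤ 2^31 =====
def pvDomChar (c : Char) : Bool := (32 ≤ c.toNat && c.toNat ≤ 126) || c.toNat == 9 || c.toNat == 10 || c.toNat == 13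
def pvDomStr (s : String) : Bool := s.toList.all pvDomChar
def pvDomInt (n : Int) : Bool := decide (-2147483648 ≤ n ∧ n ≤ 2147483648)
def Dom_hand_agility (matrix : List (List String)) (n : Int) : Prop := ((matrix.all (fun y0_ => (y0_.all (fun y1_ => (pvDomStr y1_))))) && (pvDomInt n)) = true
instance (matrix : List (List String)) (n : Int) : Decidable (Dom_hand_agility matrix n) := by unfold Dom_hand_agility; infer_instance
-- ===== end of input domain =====

-- B replaces A's counter-dict pass by flatten-filter-sort plus one run-length scan (alternative algorithm, same results).

-- ===== PORT A =====
-- A: build a counter dict over the 16 indexed cells (skipping '.'), then count items with count ≤ 2n.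
def hand_agility (matrix : List (List String)) (n : Int) : Int :=
  let max_touch := n * 2
  let numbers_to_count : PySem.Dict String Int :=
    (PySem.List.pyRange 0 4 1).foldl (fun d i =>
      (PySem.List.pyRange 0 4 1).foldl (fun d j =>
        let num := PySem.List.pyGetD (PySem.List.pyGetD matrix i []) j ""
        if num ≠ "." then d.insert num (d.getD num 0 + 1) else d) d)
      PySem.Dict.empty
  numbers_to_count.items.foldl (fun points p => if p.2 ≤ max_touch then points + 1 else points) 0

-- ===== PORT B =====
-- the two while loops of Source B: the inner loop advances j over the run of elements equal
-- to vals[i] (= takeWhile); the outer loop does one step per run, then continues at j.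
def pvRunScan (vals : List String) (m : Int) : Int :=
  match vals with
  | [] => 0
  | x :: xs =>
    (if (1 + ((xs.takeWhile (fun v => v == x)).length : Int)) ≤ m then 1 else 0)
      + pvRunScan (xs.dropWhile (fun v => v == x)) m
termination_by vals.length
decreasing_by
  have := List.length_dropWhile_le (p := fun v => v == x) (l := xs)
  simp; omega

def hand_agility_alt (matrix : List (List String)) (n : Int) : Int :=
  let vals := PySem.List.sorted
    ((PySem.List.pyRange 0 4 1).flatMap (fun i =>
      ((PySem.List.pyRange 0 4 1).map (fun j =>
        PySem.List.pyGetD (PySem.List.pyGetD matrix i []) j "")).filter (fun v => v ≠ ".")))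
    (fun x => x) false
  pvRunScan vals (2 * n)

-- ===== PRECONDITION & SPEC =====
-- Pre_: A indexes matrix[i][j] for i, j in 0..3, so it raises IndexError unless the
-- matrix has at least 4 rows and each of the first 4 rows has at least 4 cells.
def Pre_hand_agility (matrix : List (List String)) (n : Int) : Prop :=
  4 ≤ matrix.length ∧ ∀ r ∈ matrix.take 4, 4 ≤ r.length
instance (matrix : List (List String)) (n : Int) : Decidable (Pre_hand_agility matrix n) := by
  unfold Pre_hand_agility; infer_instance
def pvWitness_hand_agility : List (List String) × Int :=
  ([["1", "2", ".", "1"], [".", "2", "2", "."], ["3", ".", ".", "."], ["1", "1", ".", "2"]], 2)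
def Spec_hand_agility (matrix : List (List String)) (n : Int) (out : Int) : Prop := out = hand_agility_alt matrix n
instance (matrix : List (List String)) (n : Int) (out : Int) : Decidable (Spec_hand_agility matrix n out) := by unfold Spec_hand_agility; infer_instance

-- ===== CLAIM (what is proved, stated in full; the proofs are below) =====
def Claim_equal_hand_agility : Prop := ∀ (matrix : List (List String)) (n : Int), Dom_hand_agility matrix n → Pre_hand_agility matrix n → Spec_hand_agility matrix n (hand_agility matrix n)

-- ===== LEMMAS AND PROOFS =====

-- the counting fold with its '.'-guard is the plain counting fold over the filtered list
theorem pv_foldl_if_filter (xs : List String) (d : PySem.Dict String Int) :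
    xs.foldl (fun d v => if v ≠ "." then d.insert v (d.getD v 0 + 1) else d) d
      = (xs.filter (fun v => v ≠ ".")).foldl (fun d v => d.insert v (d.getD v 0 + 1)) d := by
  induction xs generalizing d with
  | nil => rfl
  | cons a xs ih =>
    rw [List.foldl_cons, List.filter_cons]
    by_cases h : a = "."
    · rw [if_neg (by simp [h] : ¬ a ≠ "."), if_neg (by simp [h])]
      exact ih d
    · rw [if_pos (by simp [h] : a ≠ "."), if_pos (by simp [h]), List.foldl_cons]
      exact ih _

-- A's final items loop is countP
theorem pv_foldl_points (l : List (String × Int)) (m p0 : Int) :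
    l.foldl (fun pts q => if q.2 ≤ m then pts + 1 else pts) p0
      = p0 + ((l.countP (fun q => decide (q.2 ≤ m))) : Int) := by
  induction l generalizing p0 with
  | nil => simp
  | cons a l ih =>
    rw [List.foldl_cons, ih, List.countP_cons]
    by_cases h : a.2 ≤ m <;> simp [h] <;> omega

theorem pv_countP_ext {s t : List String} (p : String → Bool) (hs : s.Nodup) (ht : t.Nodup)
    (h : ∀ a, a ∈ s ↔ a ∈ t) : s.countP p = t.countP p :=
  ((List.perm_ext_iff_of_nodup hs ht).2 h).countP_eq p

-- in a sorted list, no copy of the head survives past the leading run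
theorem pv_not_mem_dropWhile (x : String) (xs : List String)
    (hp : xs.Pairwise (· ≤ ·)) (hx : ∀ y ∈ xs, x ≤ y) :
    x ∉ xs.dropWhile (fun v => v == x) := by
  induction xs with
  | nil => simp
  | cons y ys ih =>
    rcases List.pairwise_cons.1 hp with ⟨hy, hys⟩
    rw [List.dropWhile_cons]
    by_cases h : (y == x) = true
    · rw [if_pos h]
      exact ih hys (fun z hz => hx z (List.mem_cons_of_mem _ hz))
    · rw [if_neg h]
      intro hmem
      rcases List.mem_cons.1 hmem with rfl | hmem'
      · simp at h
      · have h1 : y ≤ x := hy _ hmem'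
        have h2 : x ≤ y := hx y (List.mem_cons_self ..)
        have hxy : x = y := le_antisymm h2 h1
        subst hxy; simp at h

-- the run scan over a sorted list counts distinct values whose multiplicity is ≤ m
theorem pv_runScan_eq (N : Nat) : ∀ (zs : List String), zs.length ≤ N →
    zs.Pairwise (· ≤ ·) → ∀ m : Int,
    pvRunScan zs m
      = (((PySem.Set.ofList zs).countP (fun v => decide ((zs.count v : Int) ≤ m))) : Int) := by
  induction N with
  | zero =>
    intro zs hlen _ m
    have hz : zs = [] := List.length_eq_zero_iff.1 (Nat.le_zero.1 hlen)
    subst hz; simp [pvRunScan]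
  | succ N ih =>
    intro zs hlen hp m
    match zs with
    | [] => simp [pvRunScan]
    | x :: xs =>
      rcases List.pairwise_cons.1 hp with ⟨hx, hxs⟩
      set t := xs.takeWhile (fun v => v == x) with htdef
      set dd := xs.dropWhile (fun v => v == x) with hddef
      have hsplit : t ++ dd = xs := List.takeWhile_append_dropWhile
      have ht : ∀ v ∈ t, v = x := by
        intro v hv
        have := List.mem_takeWhile_imp (htdef ▸ hv)
        exact eq_of_beq this
      have hnd : x ∉ dd := pv_not_mem_dropWhile x xs hxs hx
      have hdp : dd.Pairwise (· ≤ ·) := hxs.sublist (List.dropWhile_sublist _)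
      have hdl : dd.length ≤ N := by
        have h1 : dd.length ≤ xs.length := by
          rw [hddef]; exact List.length_dropWhile_le _ xs
        simp at hlen; omega
      have iha := ih dd hdl hdp m
      have hct : t.count x = t.length := List.count_eq_length.2 (fun b hb => (ht b hb).symm)
      have hcd : dd.count x = 0 := List.count_eq_zero.2 hnd
      have hcx : (x :: xs).count x = t.length + 1 := by
        rw [List.count_cons_self, ← hsplit, List.count_append, hct, hcd]
      have hcv : ∀ v, v ≠ x → (x :: xs).count v = dd.count v := by
        intro v hvx
        have hvt : v ∉ t := fun hvt => hvx (ht v hvt)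
        have h1 : List.count v xs = List.count v dd := by
          rw [← hsplit, List.count_append, List.count_eq_zero.2 hvt, Nat.zero_add]
        rw [List.count_cons, h1]
        simp [Ne.symm hvx]
      have hmem : ∀ a, a ∈ PySem.Set.ofList (x :: xs) ↔ a ∈ x :: PySem.Set.ofList dd := by
        intro a
        simp only [PySem.Set.mem_ofList, List.mem_cons, ← hsplit, List.mem_append]
        constructor
        · rintro (rfl | ht' | hd)
          · exact Or.inl rfl
          · exact Or.inl (ht a ht')
          · exact Or.inr hd
        · rintro (rfl | hd)
          · exact Or.inl rfl
          · exact Or.inr (Or.inr hd)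
      have hnodup : (x :: PySem.Set.ofList dd).Nodup :=
        List.nodup_cons.2 ⟨fun hc => hnd ((PySem.Set.mem_ofList dd x).1 hc), PySem.Set.nodup_ofList dd⟩
      have hcount :
          (PySem.Set.ofList (x :: xs)).countP (fun v => decide (((x :: xs).count v : Int) ≤ m))
            = (x :: PySem.Set.ofList dd).countP (fun v => decide (((x :: xs).count v : Int) ≤ m)) :=
        pv_countP_ext _ (PySem.Set.nodup_ofList _) hnodup hmem
      have hcongr :
          (PySem.Set.ofList dd).countP (fun v => decide (((x :: xs).count v : Int) ≤ m))
            = (PySem.Set.ofList dd).countP (fun v => decide ((dd.count v : Int) ≤ m)) := by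
        apply List.countP_congr
        intro v hv
        have hvd : v ∈ dd := (PySem.Set.mem_ofList dd v).1 hv
        have hvx : v ≠ x := fun h => hnd (h ▸ hvd)
        rw [hcv v hvx]
      have hunf : pvRunScan (x :: xs) m
          = (if (1 + (t.length : Int)) ≤ m then 1 else 0) + pvRunScan dd m := by
        rw [htdef, hddef]
        simp only [pvRunScan]
      rw [hunf, iha, hcount, List.countP_cons, hcongr, hcx]
      simp only [decide_eq_true_eq]
      split_ifs <;> push_cast <;> omega

-- A's items fold over the counter equals B's run scan over the sorted list
theorem pv_master (ys : List String) (m : Int) :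
    (PySem.Dict.counter ys).items.foldl (fun pts q => if q.2 ≤ m then pts + 1 else pts) 0
      = pvRunScan (PySem.List.sorted ys (fun x => x) false) m := by
  have hperm : (PySem.List.sorted ys (fun x => x) false).Perm ys :=
    PySem.List.sorted_perm ys _ _
  rw [pv_foldl_points, PySem.Dict.items_counter, List.countP_map,
    pv_runScan_eq (PySem.List.sorted ys (fun x => x) false).length _ le_rfl
      (by simpa using PySem.List.sorted_pairwise ys (fun x => x)) m]
  have hstep :
      (PySem.Set.ofList ys).countP
          ((fun q : String × Int => decide (q.2 ≤ m)) ∘ fun k => (k, (ys.count k : Int)))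
        = (PySem.Set.ofList (PySem.List.sorted ys (fun x => x) false)).countP
          (fun v => decide (((PySem.List.sorted ys (fun x => x) false).count v : Int) ≤ m)) := by
    have h1 : (PySem.Set.ofList (PySem.List.sorted ys (fun x => x) false)).countP
          (fun v => decide (((PySem.List.sorted ys (fun x => x) false).count v : Int) ≤ m))
        = (PySem.Set.ofList (PySem.List.sorted ys (fun x => x) false)).countP
          (fun v => decide ((ys.count v : Int) ≤ m)) := by
      apply List.countP_congr
      intro v _
      rw [hperm.count_eq v]
    rw [h1]
    apply pv_countP_ext _ (PySem.Set.nodup_ofList _) (PySem.Set.nodup_ofList _)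
    intro a
    rw [PySem.Set.mem_ofList, PySem.Set.mem_ofList, hperm.mem_iff]
  rw [hstep]
  simp

-- a nested fold over two index lists is a flat fold over the flattened cell list
theorem pv_foldl_nest {α β σ γ : Type} (l1 : List α) (l2 : List β)
    (f : γ → σ → γ) (g : α → β → σ) (init : γ) :
    l1.foldl (fun d i => l2.foldl (fun d j => f d (g i j)) d) init
      = (l1.flatMap (fun i => l2.map (g i))).foldl f init := by
  induction l1 generalizing init with
  | nil => simp
  | cons a l ih =>
    simp only [List.foldl_cons, List.flatMap_cons, List.foldl_append, List.foldl_map, ih]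

-- filtering a flattened list is flattening the filtered pieces
theorem pv_filter_flatMap {α β : Type} (l : List α) (f : α → List β) (p : β → Bool) :
    (l.flatMap f).filter p = l.flatMap (fun x => (f x).filter p) := by
  induction l with
  | nil => rfl
  | cons a l ih => simp [List.flatMap_cons, List.filter_append, ih]

-- the whole A pipeline at the list level equals the whole B pipeline
theorem pv_A_items (ys : List String) (mt : Int) :
    ((ys.foldl (fun d v => if v ≠ "." then d.insert v (d.getD v 0 + 1) else d)
        PySem.Dict.empty).items.foldl (fun pts q => if q.2 ≤ mt then pts + 1 else pts) 0)
      = pvRunScan (PySem.List.sorted (ys.filter (fun v => v ≠ ".")) (fun x => x) false) mt := by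
  rw [pv_foldl_if_filter, PySem.Dict.foldl_insert_getD_add_one_eq_counter, pv_master]

-- ===== VERDICT (by name: the statement is the Claim_ definition above) =====
theorem hand_agility_spec : Claim_equal_hand_agility := by
  intro matrix n _ _
  show hand_agility _ _ = hand_agility_alt _ _
  simp only [hand_agility, hand_agility_alt]
  rw [pv_foldl_nest (PySem.List.pyRange 0 4 1) (PySem.List.pyRange 0 4 1)
    (fun d v => if v ≠ "." then PySem.Dict.insert d v (PySem.Dict.getD d v 0 + 1) else d)
    (fun i j => PySem.List.pyGetD (PySem.List.pyGetD matrix i []) j "") PySem.Dict.empty]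
  rw [mul_comm n 2, pv_A_items]
  simp [pv_filter_flatMap]
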